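-- pv_equiv track=rewrite | github.com/Juliano-Pasa/Project-Euler-Problems | Solutions/Problem 004.py | transform_to_palindrome
-- ===== SOURCE A (Python) =====
-- def transform_to_palindrome(num):
--     """ Creates a palindrome by reversing a given number
--
--         Parameters:
--         num (int): Number that will be reversed to create a palindrome (eg. 123 -> 123,321)
--
--         Returns:
--         int: A palindrome number with an even number of digits
--     """
--
--     new_number = num
--     aux_number = 0
--     power = 0
--
--     while num > 0: # While loop to reverse a given number
--         aux_number *= 10
--         aux_number += num % 10
--         num = num // 10
--         power += 1
--
--     new_number *= 10**power # Multiply the original number by its size to "fit" the reversed number at the end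
--     new_number += aux_number # Add the reversed number at the end of the new palindrome number
--
--     return new_number
-- ===== SOURCE B (Python) =====
-- def transform_to_palindrome(num):
--     """Append the reversed digits of num to num itself.
--
--     Collect the digits of num (least significant first) into a list once,
--     then fold them onto the running result: each step shifts the result
--     left one decimal place and appends the next digit.  No separate
--     reversed-number accumulator and no 10**power shift are needed.
--     """
--     digits = []
--     n = num
--     while n > 0:
--         digits.append(n % 10)
--         n //= 10
--     result = num
--     for d in digits:
--         result = result * 10 + d
--     return result
-- ===== Notes on version B (the rewrite author's own statement) =====
-- stated objective: alternative
-- what changed: Replaces A's single loop maintaining a (reversed-number, power) accumulator pair plus a final num*10**power shift-and-add with a two-phase scheme: extract the digit list once, then fold each digit directly onto the running result (result = result*10 + d), so no power counter and no exponentiation exist.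
import Mathlib
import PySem

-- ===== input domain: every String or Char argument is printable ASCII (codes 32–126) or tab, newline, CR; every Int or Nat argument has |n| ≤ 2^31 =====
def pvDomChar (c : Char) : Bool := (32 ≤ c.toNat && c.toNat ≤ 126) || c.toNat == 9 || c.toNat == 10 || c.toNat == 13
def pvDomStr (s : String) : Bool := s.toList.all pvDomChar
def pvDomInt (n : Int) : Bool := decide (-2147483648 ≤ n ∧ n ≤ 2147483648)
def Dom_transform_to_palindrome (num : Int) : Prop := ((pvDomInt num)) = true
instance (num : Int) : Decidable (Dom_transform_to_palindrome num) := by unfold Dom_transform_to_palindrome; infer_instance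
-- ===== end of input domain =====

-- B extracts the digit list once and folds it onto the result directly,
-- replacing A's (reversed-number, power) accumulator pair and final 10**power shift.


-- termination helper for both ports' loops on n > 0, n ← n // 10
theorem pv_div10_lt (n : Int) (h : 0 < n) : (PySem.Int.floordiv n 10).toNat < n.toNat := by
  rw [PySem.Int.floordiv_eq_ediv_of_pos (by norm_num)]
  have h1 := Int.mul_ediv_add_emod n 10
  have h2 := Int.emod_nonneg n (by norm_num : (10:Int) ≠ 0)
  have h3 : 0 ≤ n / 10 := Int.ediv_nonneg h.le (by norm_num)
  omega

-- ===== PORT A =====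
-- the while loop: state (num, aux_number, power)
def pvLoopA (n aux : Int) (power : Nat) : Int × Nat :=
  if h : 0 < n then
    pvLoopA (PySem.Int.floordiv n 10) (aux * 10 + PySem.Int.mod n 10) (power + 1)
  else (aux, power)
termination_by n.toNat
decreasing_by first | exact pv_div10_lt n h | exact pv_div10_lt n _h

def transform_to_palindrome (num : Int) : Int :=
  let r := pvLoopA num 0 0
  num * 10 ^ r.2 + r.1

-- ===== PORT B =====
-- first loop of B: the digit list, least significant first
def pvDigits (n : Int) : List Int :=
  if _h : 0 < n then PySem.Int.mod n 10 :: pvDigits (PySem.Int.floordiv n 10) else []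
termination_by n.toNat
decreasing_by first | exact pv_div10_lt n h | exact pv_div10_lt n _h

def transform_to_palindrome_alt (num : Int) : Int :=
  (pvDigits num).foldl (fun result d => result * 10 + d) num

-- ===== PRECONDITION & SPEC =====
def Spec_transform_to_palindrome (num : Int) (out : Int) : Prop := out = transform_to_palindrome_alt num
instance (num : Int) (out : Int) : Decidable (Spec_transform_to_palindrome num out) := by unfold Spec_transform_to_palindrome; infer_instance

-- ===== CLAIM (what is proved, stated in full; the proofs are below) =====
def Claim_equal_transform_to_palindrome : Prop := ∀ (num : Int), Dom_transform_to_palindrome num → Spec_transform_to_palindrome num (transform_to_palindrome num)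

-- ===== LEMMAS AND PROOFS =====

-- folding digits onto x = shifting x past them and folding onto 0
theorem pv_foldl_shift (ds : List Int) (x : Int) :
    ds.foldl (fun r d => r * 10 + d) x
      = x * 10 ^ ds.length + ds.foldl (fun r d => r * 10 + d) 0 := by
  induction ds generalizing x with
  | nil => simp
  | cons d ds ih =>
    simp only [List.foldl_cons, List.length_cons]
    rw [ih (x * 10 + d), ih (0 * 10 + d)]
    ring

-- A's loop computes the fold of B's digit list and its length
theorem pv_loopA_eq (n : Int) (aux : Int) (p : Nat) :
    pvLoopA n aux p
      = ((pvDigits n).foldl (fun r d => r * 10 + d) aux, p + (pvDigits n).length) := by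
  induction n, aux, p using pvLoopA.induct with
  | case1 n aux p h ih =>
    rw [pvLoopA, pvDigits]
    simp only [dif_pos h, List.foldl_cons, List.length_cons, ih, Prod.mk.injEq]
    exact ⟨trivial, by omega⟩
  | case2 n aux p h =>
    rw [pvLoopA, pvDigits]
    simp [dif_neg h]

-- ===== VERDICT (by name: the statement is the Claim_ definition above) =====
theorem transform_to_palindrome_spec : Claim_equal_transform_to_palindrome := by
  intro num _
  unfold Spec_transform_to_palindrome transform_to_palindrome transform_to_palindrome_alt
  rw [pv_loopA_eq num 0 0, pv_foldl_shift (pvDigits num) num]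
  simp
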